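-- pv_equiv track=rewrite | github.com/erdongchendou/annotation-tool | server.py | split_file_indices
-- ===== SOURCE A (Python) =====
-- def split_file_indices(total, part_count):
--     base_size = total // part_count
--     remainder = total % part_count
--     start = 0
--     parts = []
--     for index in range(part_count):
--         size = base_size + (1 if index < remainder else 0)
--         end = start + size
--         parts.append(list(range(start, end)))
--         start = end
--     return parts
-- ===== SOURCE B (Python) =====
-- def split_file_indices(total, part_count):
--     base = total // part_count
--     rem = total % part_count
--
--     def bound(i):
--         return i * base + min(i, rem)
--
--     return [list(range(bound(i), bound(i + 1))) for i in range(part_count)]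
-- ===== Notes on version B (the rewrite author's own statement) =====
-- stated objective: alternative
-- what changed: Replaces the sequential running-start accumulator loop with a closed-form boundary function bound(i) = i*base + min(i, rem), so each part's endpoints are computed independently of previous parts.
import Mathlib
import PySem

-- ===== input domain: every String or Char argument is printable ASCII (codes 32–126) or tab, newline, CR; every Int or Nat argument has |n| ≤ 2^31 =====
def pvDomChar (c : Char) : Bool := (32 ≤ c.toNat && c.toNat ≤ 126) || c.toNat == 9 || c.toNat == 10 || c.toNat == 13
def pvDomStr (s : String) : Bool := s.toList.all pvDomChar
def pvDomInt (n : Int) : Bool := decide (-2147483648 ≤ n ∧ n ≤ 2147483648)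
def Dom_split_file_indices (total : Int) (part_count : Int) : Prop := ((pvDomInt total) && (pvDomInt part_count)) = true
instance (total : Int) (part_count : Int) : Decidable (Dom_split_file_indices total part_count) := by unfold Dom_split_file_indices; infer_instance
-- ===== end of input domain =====

-- B replaces A's running-start accumulator by a closed-form per-index boundary function (objective: alternative decomposition, same cost).

-- ===== PORT A =====
def split_file_indices (total : Int) (part_count : Int) : List (List Int) :=
  let base_size := PySem.Int.floordiv total part_count
  let remainder := PySem.Int.mod total part_count
  let st := (PySem.List.pyRange 0 part_count 1).foldl
    (fun (st : Int × List (List Int)) index =>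
      let size := base_size + (if index < remainder then 1 else 0)
      let e := st.1 + size
      (e, st.2 ++ [PySem.List.pyRange st.1 e 1]))
    (0, [])
  st.2

-- ===== PORT B =====
-- bound(i) from Source B
def sfi_bound (base rem i : Int) : Int := i * base + min i rem

def split_file_indices_alt (total : Int) (part_count : Int) : List (List Int) :=
  let base := PySem.Int.floordiv total part_count
  let rem := PySem.Int.mod total part_count
  (PySem.List.pyRange 0 part_count 1).map
    (fun i => PySem.List.pyRange (sfi_bound base rem i) (sfi_bound base rem (i + 1)) 1)

-- ===== PRECONDITION & SPEC =====
-- Pre_ excludes exactly part_count = 0, where Python A raises ZeroDivisionError (B raises it too).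
def Pre_split_file_indices (total : Int) (part_count : Int) : Prop := part_count ≠ 0
instance (total : Int) (part_count : Int) : Decidable (Pre_split_file_indices total part_count) := by unfold Pre_split_file_indices; infer_instance
def pvWitness_split_file_indices : Int × Int := (10, 3)

def Spec_split_file_indices (total : Int) (part_count : Int) (out : List (List Int)) : Prop := out = split_file_indices_alt total part_count
instance (total : Int) (part_count : Int) (out : List (List Int)) : Decidable (Spec_split_file_indices total part_count out) := by unfold Spec_split_file_indices; infer_instance

-- ===== CLAIM (what is proved, stated in full; the proofs are below) =====
def Claim_equal_split_file_indices : Prop := ∀ (total : Int) (part_count : Int), Dom_split_file_indices total part_count → Pre_split_file_indices total part_count → Spec_split_file_indices total part_count (split_file_indices total part_count)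

-- ===== LEMMAS AND PROOFS =====

-- A's loop invariant: after the first n iterations, start = bound(n) and the parts collected
-- are exactly B's closed-form parts for indices 0..n-1.
lemma sfi_loop (base rem : Int) (hrem : 0 ≤ rem) (n : Nat) :
    ((PySem.List.pyRange 0 (n : Int) 1).foldl
      (fun (st : Int × List (List Int)) index =>
        (st.1 + (base + (if index < rem then 1 else 0)),
         st.2 ++ [PySem.List.pyRange st.1 (st.1 + (base + (if index < rem then 1 else 0))) 1]))
      (0, [])) =
    (sfi_bound base rem (n : Int),
     (PySem.List.pyRange 0 (n : Int) 1).map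
       (fun i => PySem.List.pyRange (sfi_bound base rem i) (sfi_bound base rem (i + 1)) 1)) := by
  induction n with
  | zero =>
    simp [PySem.List.pyRange_one_eq_nil (by omega : (0:Int) ≤ 0), sfi_bound]
    omega
  | succ k ih =>
    have hcast : ((k + 1 : Nat) : Int) = (k : Int) + 1 := by push_cast; ring
    rw [hcast, PySem.List.pyRange_one_succ_right (by positivity)]
    rw [List.foldl_append, List.map_append, ih]
    simp only [List.foldl_cons, List.foldl_nil, List.map_cons, List.map_nil]
    have hb : sfi_bound base rem (k : Int) + (base + (if (k : Int) < rem then 1 else 0))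
        = sfi_bound base rem ((k : Int) + 1) := by
      simp only [sfi_bound]
      have h1 : ((k : Int) + 1) * base = (k : Int) * base + base := by ring
      rw [h1]
      split_ifs <;> omega
    rw [hb]

-- ===== VERDICT (by name: the statement is the Claim_ definition above) =====
theorem split_file_indices_spec : Claim_equal_split_file_indices := by
  intro total part_count _ hpre
  unfold Spec_split_file_indices split_file_indices split_file_indices_alt
  by_cases hpos : 0 < part_count
  · have hrem : 0 ≤ PySem.Int.mod total part_count := by
      rw [PySem.Int.mod_eq_emod_of_pos hpos]
      exact Int.emod_nonneg _ (by omega)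
    have hcast : part_count = ((part_count.toNat : Nat) : Int) := by omega
    have key := sfi_loop (PySem.Int.floordiv total part_count) (PySem.Int.mod total part_count)
      hrem part_count.toNat
    rw [← hcast] at key
    simp only [key]
  · have hnil : PySem.List.pyRange 0 part_count 1 = [] :=
      PySem.List.pyRange_one_eq_nil (by omega)
    simp [hnil]
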